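-- pv_equiv track=rewrite | github.com/Ced97110/motionengine | src/motion/wiki_ops/retrieval.py | _tag_overlap_score
-- ===== SOURCE A (Python) =====
-- _TAG_STOPWORDS: frozenset[str] = frozenset(
--     {"to", "of", "a", "the", "on", "in", "and", "or", "for", "at", "from"}
-- )
--
-- def _tag_tokens(tag: str) -> set[str]:
--     """Lowercase split of a kebab-case tag into its content tokens."""
--     return {word for word in tag.lower().split("-") if word and word not in _TAG_STOPWORDS}
--
-- def _tag_overlap_score(play_tags: list[str], other_tags: list[str]) -> tuple[int, list[str]]:
--     """Return (score, matched play tags).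
--
--     Score = number of *play* tags that share at least one non-stopword token
--     with any tag on the other page. Matched tags list preserves the play's
--     own tag wording so the UI can show "matched on: step-up-screen".
--     """
--     other_tokens: set[str] = set()
--     for tag in other_tags:
--         other_tokens.update(_tag_tokens(tag))
--     matched: list[str] = []
--     for tag in play_tags:
--         play_tokens = _tag_tokens(tag)
--         if play_tokens & other_tokens:
--             matched.append(tag)
--     return len(matched), matched
-- ===== SOURCE B (Python) =====
-- _TAG_STOPWORDS: frozenset = frozenset(
--     {"to", "of", "a", "the", "on", "in", "and", "or", "for", "at", "from"}
-- )
--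
-- def _tag_tokens(tag):
--     return {word for word in tag.lower().split("-") if word and word not in _TAG_STOPWORDS}
--
-- def _matches(tokens, other_sets):
--     return any(not tokens.isdisjoint(s) for s in other_sets)
--
-- def _tag_overlap_score(play_tags, other_tags):
--     other_sets = [_tag_tokens(other) for other in other_tags]
--     matched = [tag for tag in play_tags if _matches(_tag_tokens(tag), other_sets)]
--     return len(matched), matched
-- ===== Notes on version B (the rewrite author's own statement) =====
-- stated objective: simpler
-- what changed: Drops the precomputed union set of A and its explicit accumulator loop: B tokenizes the other tags once into a list of token sets and builds matched as one filtering comprehension that, per play tag, scans that list with a short-circuiting any() on set disjointness.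
import Mathlib
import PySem

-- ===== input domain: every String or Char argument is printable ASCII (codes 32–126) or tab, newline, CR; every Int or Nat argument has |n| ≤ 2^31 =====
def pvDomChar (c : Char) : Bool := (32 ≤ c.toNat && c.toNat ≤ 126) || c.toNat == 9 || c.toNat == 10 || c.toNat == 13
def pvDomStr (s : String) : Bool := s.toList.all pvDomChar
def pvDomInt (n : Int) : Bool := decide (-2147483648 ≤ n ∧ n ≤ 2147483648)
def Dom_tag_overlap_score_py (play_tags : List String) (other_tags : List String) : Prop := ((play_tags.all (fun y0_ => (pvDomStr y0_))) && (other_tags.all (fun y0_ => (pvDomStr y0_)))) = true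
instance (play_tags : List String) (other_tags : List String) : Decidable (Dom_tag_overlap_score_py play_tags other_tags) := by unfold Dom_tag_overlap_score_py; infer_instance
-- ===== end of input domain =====

-- B drops the precomputed union set of other-page tokens: matched is one filter over
-- play_tags that re-scans other_tags per tag with a short-circuiting any() on set
-- disjointness (objective: simpler).


-- ===== PORT A =====
-- _TAG_STOPWORDS (frozenset; only membership is used, so a list is exact)
def pvTagStopwords : List String :=
  ["to", "of", "a", "the", "on", "in", "and", "or", "for", "at", "from"]

-- _tag_tokens: set comprehension over tag.lower().split("-")
def pvTagTokens (tag : String) : PySem.Set String :=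
  PySem.Set.ofList (((PySem.Str.lower tag).splitOn "-").filter
    (fun w => w != "" && !pvTagStopwords.contains w))

def tag_overlap_score_py (play_tags : List String) (other_tags : List String) : Int × List String :=
  let other_tokens : PySem.Set String :=
    other_tags.foldl (fun s tag => PySem.Set.update s (pvTagTokens tag)) PySem.Set.empty
  let matched : List String :=
    play_tags.foldl (fun acc tag =>
      let play_tokens := pvTagTokens tag
      if PySem.Set.inter play_tokens other_tokens ≠ [] then acc ++ [tag] else acc) []
  ((matched.length : Int), matched)

-- ===== PORT B =====
-- _matches: any() over the precomputed token sets, short-circuiting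
def pvMatches (tokens : PySem.Set String) (other_sets : List (PySem.Set String)) : Bool :=
  other_sets.any (fun s => !PySem.Set.isdisjoint tokens s)

def tag_overlap_score_py_alt (play_tags : List String) (other_tags : List String) : Int × List String :=
  let other_sets : List (PySem.Set String) := other_tags.map pvTagTokens
  let matched : List String :=
    play_tags.filter (fun tag => pvMatches (pvTagTokens tag) other_sets)
  ((matched.length : Int), matched)

-- ===== PRECONDITION & SPEC =====
def Spec_tag_overlap_score_py (play_tags : List String) (other_tags : List String) (out : Int × List String) : Prop := out = tag_overlap_score_py_alt play_tags other_tags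
instance (play_tags : List String) (other_tags : List String) (out : Int × List String) : Decidable (Spec_tag_overlap_score_py play_tags other_tags out) := by unfold Spec_tag_overlap_score_py; infer_instance

-- ===== CLAIM (what is proved, stated in full; the proofs are below) =====
def Claim_equal_tag_overlap_score_py : Prop := ∀ (play_tags : List String) (other_tags : List String), Dom_tag_overlap_score_py play_tags other_tags → Spec_tag_overlap_score_py play_tags other_tags (tag_overlap_score_py play_tags other_tags)

-- ===== LEMMAS AND PROOFS =====

-- membership in the union set A builds by folding update over other_tags
theorem pv_mem_foldl_update (l : List String) (s : PySem.Set String) (y : String) :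
    y ∈ l.foldl (fun s tag => PySem.Set.update s (pvTagTokens tag)) s ↔
      y ∈ s ∨ ∃ t ∈ l, y ∈ pvTagTokens t := by
  induction l generalizing s with
  | nil => simp
  | cons a l ih =>
    simp only [List.foldl_cons, ih, PySem.Set.mem_update, List.mem_cons]
    constructor
    · rintro ((h | h) | ⟨t, ht, hy⟩)
      · exact Or.inl h
      · exact Or.inr ⟨a, Or.inl rfl, h⟩
      · exact Or.inr ⟨t, Or.inr ht, hy⟩
    · rintro (h | ⟨t, (rfl | ht), hy⟩)
      · exact Or.inl (Or.inl h)
      · exact Or.inl (Or.inr hy)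
      · exact Or.inr ⟨t, ht, hy⟩

-- the per-tag tests of A and B agree
theorem pv_test_iff (tag : String) (other_tags : List String) :
    (PySem.Set.inter (pvTagTokens tag)
        (other_tags.foldl (fun s t => PySem.Set.update s (pvTagTokens t)) PySem.Set.empty) ≠ []) ↔
      (pvMatches (pvTagTokens tag) (other_tags.map pvTagTokens)) = true := by
  rw [← List.isEmpty_eq_false_iff, List.isEmpty_eq_false_iff_exists_mem]
  simp only [pvMatches, List.any_map, Function.comp, PySem.Set.mem_inter, pv_mem_foldl_update,
    PySem.Set.empty, List.not_mem_nil, false_or, List.any_eq_true, Bool.not_eq_eq_eq_not,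
    Bool.not_true, ← Bool.not_eq_true, PySem.Set.isdisjoint_iff, not_forall, not_not]
  constructor
  · rintro ⟨x, hx, t, ht, hxt⟩
    exact ⟨t, ht, x, hx, hxt⟩
  · rintro ⟨t, ht, x, hx, hxt⟩
    exact ⟨x, hx, t, ht, hxt⟩

-- ===== VERDICT (by name: the statement is the Claim_ definition above) =====
theorem tag_overlap_score_py_spec : Claim_equal_tag_overlap_score_py := by
  intro play_tags other_tags _
  unfold Spec_tag_overlap_score_py tag_overlap_score_py tag_overlap_score_py_alt
  dsimp only
  rw [PySem.List.foldl_append_ite_eq_filter, List.nil_append]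
  have hm := List.filter_congr (l := play_tags)
    (p := fun tag => decide (PySem.Set.inter (pvTagTokens tag)
      (other_tags.foldl (fun s t => PySem.Set.update s (pvTagTokens t)) PySem.Set.empty) ≠ []))
    (q := fun tag => pvMatches (pvTagTokens tag) (other_tags.map pvTagTokens))
    (fun tag _ => by rw [Bool.eq_iff_iff]; simp only [decide_eq_true_eq]; exact pv_test_iff tag other_tags)
  rw [hm]
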